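-- pv_equiv track=rewrite | github.com/albarami/QNWIS | src/qnwis/orchestration/legendary_debate_orchestrator.py | _select_risk_assessors
-- ===== SOURCE A (Python) =====
-- from typing import Any, Callable, Dict, List, Optional
--
-- def _select_risk_assessors(
--
--     risk_identifier: str,
--     risk_description: str,
--     llm_agents: Dict[str, Any]
-- ) -> List[str]:
--     """
--     Select 2 most relevant agents to assess a risk.
--     INTELLIGENT SELECTION - NOT ALL AGENTS.
--     """
--     risk_lower = risk_description.lower()
--
--     # Exclude the identifier
--     candidates = [name for name in llm_agents.keys() if name != risk_identifier]
--
--     # Score candidates based on keyword relevance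
--     scored = []
--     for candidate in candidates:
--         score = 0
--
--         # Nationalization agent for policy/qatarization risks
--         if candidate == "Nationalization" and any(word in risk_lower for word in ["qatarization", "policy", "national", "expat"]):
--             score += 3
--
--         # Skills agent for workforce/training risks
--         if candidate == "SkillsAgent" and any(word in risk_lower for word in ["skill", "training", "education", "workforce"]):
--             score += 3
--
--         # Strategy agents for systemic risks
--         if "Strategy" in candidate and any(word in risk_lower for word in ["strategy", "systemic", "long-term", "structural"]):
--             score += 2
--
--         # Pattern detective for data anomalies
--         if "PatternDetective" in candidate and any(word in risk_lower for word in ["anomaly", "pattern", "unexpected", "historical"]):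
--             score += 2
--
--         # Labour economist for economic risks
--         if candidate == "LabourEconomist" and any(word in risk_lower for word in ["economic", "employment", "unemployment", "wage"]):
--             score += 3
--
--         scored.append((candidate, score))
--
--     # Sort by score descending
--     scored.sort(key=lambda x: x[1], reverse=True)
--
--     return [name for name, score in scored]
-- ===== SOURCE B (Python) =====
-- def _score(name, risk_lower):
--     return (
--         (3 if name == "Nationalization" and any(w in risk_lower for w in ["qatarization", "policy", "national", "expat"]) else 0)
--         + (3 if name == "SkillsAgent" and any(w in risk_lower for w in ["skill", "training", "education", "workforce"]) else 0)
--         + (2 if "Strategy" in name and any(w in risk_lower for w in ["strategy", "systemic", "long-term", "structural"]) else 0)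
--         + (2 if "PatternDetective" in name and any(w in risk_lower for w in ["anomaly", "pattern", "unexpected", "historical"]) else 0)
--         + (3 if name == "LabourEconomist" and any(w in risk_lower for w in ["economic", "employment", "unemployment", "wage"]) else 0)
--     )
--
--
-- def _select_risk_assessors(risk_identifier, risk_description, llm_agents):
--     risk_lower = risk_description.lower()
--     # bucket sort: scores can only be 0..4, so place each candidate in its
--     # score bucket in one pass and read the buckets out from high to low
--     buckets = [[], [], [], [], []]
--     for name in llm_agents:
--         if name == risk_identifier:
--             continue
--         buckets[_score(name, risk_lower)].append(name)
--     out = []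
--     for s in (4, 3, 2, 1, 0):
--         out.extend(buckets[s])
--     return out
-- ===== Notes on version B (the rewrite author's own statement) =====
-- stated objective: alternative
-- what changed: Replaces build-pairs-then-stable-reverse-sort with a single-pass bucket placement over the fixed score range 0..4, reading buckets out from highest score to lowest to reproduce the stable order.
import Mathlib
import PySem

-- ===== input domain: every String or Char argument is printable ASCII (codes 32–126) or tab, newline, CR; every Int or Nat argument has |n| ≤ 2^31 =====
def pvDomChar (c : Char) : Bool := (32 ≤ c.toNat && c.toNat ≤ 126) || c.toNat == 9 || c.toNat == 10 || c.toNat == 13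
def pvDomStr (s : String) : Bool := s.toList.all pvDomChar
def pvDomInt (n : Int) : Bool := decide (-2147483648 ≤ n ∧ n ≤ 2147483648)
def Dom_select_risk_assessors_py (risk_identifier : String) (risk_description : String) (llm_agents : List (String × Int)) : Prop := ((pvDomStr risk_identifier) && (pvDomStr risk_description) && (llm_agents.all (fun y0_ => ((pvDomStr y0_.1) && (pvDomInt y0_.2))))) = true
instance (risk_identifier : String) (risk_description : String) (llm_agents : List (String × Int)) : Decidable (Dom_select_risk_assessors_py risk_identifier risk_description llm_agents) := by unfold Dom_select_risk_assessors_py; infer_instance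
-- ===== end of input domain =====

-- B replaces A's build-pairs-then-stable-reverse-sort by a single-pass bucket
-- placement over the fixed score range 0..4 read out from high to low (alternative decomposition).

-- ===== PORT A =====
-- literal transliteration of A: score each candidate with a chain of `score +=` steps,
-- append (candidate, score) pairs, stable-sort by score descending, project the names
def select_risk_assessors_py (risk_identifier : String) (risk_description : String) (llm_agents : List (String × Int)) : List String :=
  let risk_lower := PySem.Str.lower risk_description
  let candidates := ((PySem.Dict.ofList llm_agents).keys).filter (fun name => name != risk_identifier)
  let scored := candidates.foldl (fun acc candidate =>
    let score : Int := 0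
    let score := if candidate == "Nationalization" && (["qatarization", "policy", "national", "expat"].any (fun w => PySem.Str.isIn w risk_lower)) then score + 3 else score
    let score := if candidate == "SkillsAgent" && (["skill", "training", "education", "workforce"].any (fun w => PySem.Str.isIn w risk_lower)) then score + 3 else score
    let score := if PySem.Str.isIn "Strategy" candidate && (["strategy", "systemic", "long-term", "structural"].any (fun w => PySem.Str.isIn w risk_lower)) then score + 2 else score
    let score := if PySem.Str.isIn "PatternDetective" candidate && (["anomaly", "pattern", "unexpected", "historical"].any (fun w => PySem.Str.isIn w risk_lower)) then score + 2 else score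
    let score := if candidate == "LabourEconomist" && (["economic", "employment", "unemployment", "wage"].any (fun w => PySem.Str.isIn w risk_lower)) then score + 3 else score
    acc ++ [(candidate, score)]) []
  let sorted := PySem.List.sorted scored (fun x => x.2) true
  sorted.map (fun p => p.1)

-- ===== PORT B =====
-- B's helper `_score`: the same keyword checks as one sum expression
def pvAltScore (name : String) (risk_lower : String) : Int :=
  (if name == "Nationalization" && (["qatarization", "policy", "national", "expat"].any (fun w => PySem.Str.isIn w risk_lower)) then 3 else 0)
  + (if name == "SkillsAgent" && (["skill", "training", "education", "workforce"].any (fun w => PySem.Str.isIn w risk_lower)) then 3 else 0)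
  + (if PySem.Str.isIn "Strategy" name && (["strategy", "systemic", "long-term", "structural"].any (fun w => PySem.Str.isIn w risk_lower)) then 2 else 0)
  + (if PySem.Str.isIn "PatternDetective" name && (["anomaly", "pattern", "unexpected", "historical"].any (fun w => PySem.Str.isIn w risk_lower)) then 2 else 0)
  + (if name == "LabourEconomist" && (["economic", "employment", "unemployment", "wage"].any (fun w => PySem.Str.isIn w risk_lower)) then 3 else 0)

-- the five buckets `buckets[0] .. buckets[4]` as a tuple (b4, b3, b2, b1, b0);
-- `buckets[score].append(name)` becomes the if-chain on the score
abbrev pvBuckets : Type := List String × List String × List String × List String × List String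

def pvBucketStep (risk_identifier : String) (risk_lower : String) (b : pvBuckets) (name : String) : pvBuckets :=
  if name == risk_identifier then b
  else
    let s := pvAltScore name risk_lower
    if s == 4 then (b.1 ++ [name], b.2.1, b.2.2.1, b.2.2.2.1, b.2.2.2.2)
    else if s == 3 then (b.1, b.2.1 ++ [name], b.2.2.1, b.2.2.2.1, b.2.2.2.2)
    else if s == 2 then (b.1, b.2.1, b.2.2.1 ++ [name], b.2.2.2.1, b.2.2.2.2)
    else if s == 1 then (b.1, b.2.1, b.2.2.1, b.2.2.2.1 ++ [name], b.2.2.2.2)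
    else (b.1, b.2.1, b.2.2.1, b.2.2.2.1, b.2.2.2.2 ++ [name])

def select_risk_assessors_py_alt (risk_identifier : String) (risk_description : String) (llm_agents : List (String × Int)) : List String :=
  let risk_lower := PySem.Str.lower risk_description
  let b := ((PySem.Dict.ofList llm_agents).keys).foldl (pvBucketStep risk_identifier risk_lower) ([], [], [], [], [])
  b.1 ++ b.2.1 ++ b.2.2.1 ++ b.2.2.2.1 ++ b.2.2.2.2

-- ===== PRECONDITION & SPEC =====
def Spec_select_risk_assessors_py (risk_identifier : String) (risk_description : String) (llm_agents : List (String × Int)) (out : List String) : Prop := out = select_risk_assessors_py_alt risk_identifier risk_description llm_agents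
instance (risk_identifier : String) (risk_description : String) (llm_agents : List (String × Int)) (out : List String) : Decidable (Spec_select_risk_assessors_py risk_identifier risk_description llm_agents out) := by unfold Spec_select_risk_assessors_py; infer_instance

-- ===== CLAIM (what is proved, stated in full; the proofs are below) =====
def Claim_equal_select_risk_assessors_py : Prop := ∀ (risk_identifier : String) (risk_description : String) (llm_agents : List (String × Int)), Dom_select_risk_assessors_py risk_identifier risk_description llm_agents → Spec_select_risk_assessors_py risk_identifier risk_description llm_agents (select_risk_assessors_py risk_identifier risk_description llm_agents)

-- ===== LEMMAS AND PROOFS =====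

-- A's let-chain score, as a named function (definitionally equal to the chain inlined in port A)
def pvChainScore (name : String) (rl : String) : Int :=
  let score : Int := 0
  let score := if name == "Nationalization" && (["qatarization", "policy", "national", "expat"].any (fun w => PySem.Str.isIn w rl)) then score + 3 else score
  let score := if name == "SkillsAgent" && (["skill", "training", "education", "workforce"].any (fun w => PySem.Str.isIn w rl)) then score + 3 else score
  let score := if PySem.Str.isIn "Strategy" name && (["strategy", "systemic", "long-term", "structural"].any (fun w => PySem.Str.isIn w rl)) then score + 2 else score
  let score := if PySem.Str.isIn "PatternDetective" name && (["anomaly", "pattern", "unexpected", "historical"].any (fun w => PySem.Str.isIn w rl)) then score + 2 else score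
  let score := if name == "LabourEconomist" && (["economic", "employment", "unemployment", "wage"].any (fun w => PySem.Str.isIn w rl)) then score + 3 else score
  score

-- A's let-chain score equals B's sum score
theorem pvScore_eq (name rl : String) : pvChainScore name rl = pvAltScore name rl := by
  unfold pvChainScore pvAltScore
  split_ifs <;> norm_num

-- scores are bounded: 0 ≤ score ≤ 4 (the three `==` branches are mutually
-- exclusive and exclude the two substring branches)
theorem pvScore_bounds (name rl : String) : 0 ≤ pvAltScore name rl ∧ pvAltScore name rl ≤ 4 := by
  unfold pvAltScore
  by_cases hn1 : name = "Nationalization"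
  · subst hn1
    simp only [show PySem.Str.isIn "Strategy" "Nationalization" = false from by decide,
      show PySem.Str.isIn "PatternDetective" "Nationalization" = false from by decide,
      show ("Nationalization" == "SkillsAgent") = false from by decide,
      show ("Nationalization" == "LabourEconomist") = false from by decide,
      Bool.false_and, Bool.and_eq_true]
    split_ifs <;> first | omega | exact absurd ‹False› not_false
  by_cases hn2 : name = "SkillsAgent"
  · subst hn2
    simp only [show PySem.Str.isIn "Strategy" "SkillsAgent" = false from by decide,
      show PySem.Str.isIn "PatternDetective" "SkillsAgent" = false from by decide,
      show ("SkillsAgent" == "Nationalization") = false from by decide,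
      show ("SkillsAgent" == "LabourEconomist") = false from by decide,
      Bool.false_and, Bool.and_eq_true]
    split_ifs <;> first | omega | exact absurd ‹False› not_false
  by_cases hn3 : name = "LabourEconomist"
  · subst hn3
    simp only [show PySem.Str.isIn "Strategy" "LabourEconomist" = false from by decide,
      show PySem.Str.isIn "PatternDetective" "LabourEconomist" = false from by decide,
      show ("LabourEconomist" == "Nationalization") = false from by decide,
      show ("LabourEconomist" == "SkillsAgent") = false from by decide,
      Bool.false_and, Bool.and_eq_true]
    split_ifs <;> first | omega | exact absurd ‹False› not_false
  · simp only [beq_eq_false_iff_ne.mpr hn1, beq_eq_false_iff_ne.mpr hn2,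
      beq_eq_false_iff_ne.mpr hn3, Bool.false_and]
    split_ifs <;> first | omega | exact absurd ‹False› not_false

-- generic: insertBy passes over a prefix none of whose elements are strictly smaller
theorem pvInsert_skip {α : Type} (key : α → Int) (x : α) (hi lo : List α)
    (h : ∀ y ∈ hi, ¬ key y < key x) :
    PySem.List.insertBy (fun a b => decide (key b < key a)) x (hi ++ lo)
      = hi ++ PySem.List.insertBy (fun a b => decide (key b < key a)) x lo := by
  induction hi with
  | nil => simp
  | cons y ys ih =>
      have hy : ¬ key y < key x := h y (by simp)
      simp [PySem.List.insertBy, hy, ih (fun z hz => h z (by simp [hz]))]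

-- generic: insertBy goes to the front when every element is strictly smaller
theorem pvInsert_front {α : Type} (key : α → Int) (x : α) (lo : List α)
    (h : ∀ y ∈ lo, key y < key x) :
    PySem.List.insertBy (fun a b => decide (key b < key a)) x lo = x :: lo := by
  cases lo with
  | nil => simp [PySem.List.insertBy]
  | cons y ys => simp [PySem.List.insertBy, h y (by simp)]

-- placing one score-bounded pair into the concatenation of the five score groups
theorem pvInsert_groups (x : String × Int) (F4 F3 F2 F1 F0 : List (String × Int))
    (m4 : ∀ y ∈ F4, y.2 = 4) (m3 : ∀ y ∈ F3, y.2 = 3) (m2 : ∀ y ∈ F2, y.2 = 2)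
    (m1 : ∀ y ∈ F1, y.2 = 1) (m0 : ∀ y ∈ F0, y.2 = 0) (hx : 0 ≤ x.2 ∧ x.2 ≤ 4) :
    PySem.List.insertBy (fun a b => decide (b.2 < a.2)) x (F4 ++ F3 ++ F2 ++ F1 ++ F0)
      = (F4 ++ (List.filter (fun p => p.2 == (4:Int)) [x]))
        ++ (F3 ++ (List.filter (fun p => p.2 == (3:Int)) [x]))
        ++ (F2 ++ (List.filter (fun p => p.2 == (2:Int)) [x]))
        ++ (F1 ++ (List.filter (fun p => p.2 == (1:Int)) [x]))
        ++ (F0 ++ (List.filter (fun p => p.2 == (0:Int)) [x])) := by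
  obtain ⟨nm, s⟩ := x
  obtain ⟨hs0, hs4⟩ := hx
  simp only at hs0 hs4
  interval_cases s
  · -- score 0
    have e : F4 ++ F3 ++ F2 ++ F1 ++ F0 = (F4 ++ F3 ++ F2 ++ F1 ++ F0) ++ ([] : List (String × Int)) := by simp
    rw [e, pvInsert_skip (fun p => p.2) (nm, 0) _ _ ?_]
    · rw [pvInsert_front (fun p => p.2) (nm, 0) [] (by simp)]
      simp [List.append_assoc]
    · intro y hy
      simp only [List.mem_append] at hy
      rcases hy with (((hy | hy) | hy) | hy) | hy
      · have := m4 y hy; beta_reduce; omega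
      · have := m3 y hy; beta_reduce; omega
      · have := m2 y hy; beta_reduce; omega
      · have := m1 y hy; beta_reduce; omega
      · have := m0 y hy; beta_reduce; omega
  · -- score 1
    have e : F4 ++ F3 ++ F2 ++ F1 ++ F0 = (F4 ++ F3 ++ F2 ++ F1) ++ F0 := by simp [List.append_assoc]
    rw [e, pvInsert_skip (fun p => p.2) (nm, 1) _ _ ?_]
    · rw [pvInsert_front (fun p => p.2) (nm, 1) F0 (fun y hy => by have := m0 y hy; simp only; omega)]
      simp [List.append_assoc]
    · intro y hy
      simp only [List.mem_append] at hy
      rcases hy with ((hy | hy) | hy) | hy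
      · have := m4 y hy; beta_reduce; omega
      · have := m3 y hy; beta_reduce; omega
      · have := m2 y hy; beta_reduce; omega
      · have := m1 y hy; beta_reduce; omega
  · -- score 2
    have e : F4 ++ F3 ++ F2 ++ F1 ++ F0 = (F4 ++ F3 ++ F2) ++ (F1 ++ F0) := by simp [List.append_assoc]
    rw [e, pvInsert_skip (fun p => p.2) (nm, 2) _ _ ?_]
    · rw [pvInsert_front (fun p => p.2) (nm, 2) (F1 ++ F0) ?_]
      · simp [List.append_assoc]
      · intro y hy
        simp only [List.mem_append] at hy
        rcases hy with hy | hy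
        · have := m1 y hy; simp only; omega
        · have := m0 y hy; simp only; omega
    · intro y hy
      simp only [List.mem_append] at hy
      rcases hy with (hy | hy) | hy
      · have := m4 y hy; beta_reduce; omega
      · have := m3 y hy; beta_reduce; omega
      · have := m2 y hy; beta_reduce; omega
  · -- score 3
    have e : F4 ++ F3 ++ F2 ++ F1 ++ F0 = (F4 ++ F3) ++ (F2 ++ F1 ++ F0) := by simp [List.append_assoc]
    rw [e, pvInsert_skip (fun p => p.2) (nm, 3) _ _ ?_]
    · rw [pvInsert_front (fun p => p.2) (nm, 3) (F2 ++ F1 ++ F0) ?_]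
      · simp [List.append_assoc]
      · intro y hy
        simp only [List.mem_append] at hy
        rcases hy with (hy | hy) | hy
        · have := m2 y hy; simp only; omega
        · have := m1 y hy; simp only; omega
        · have := m0 y hy; simp only; omega
    · intro y hy
      simp only [List.mem_append] at hy
      rcases hy with hy | hy
      · have := m4 y hy; beta_reduce; omega
      · have := m3 y hy; beta_reduce; omega
  · -- score 4
    have e : F4 ++ F3 ++ F2 ++ F1 ++ F0 = F4 ++ (F3 ++ F2 ++ F1 ++ F0) := by simp [List.append_assoc]
    rw [e, pvInsert_skip (fun p => p.2) (nm, 4) _ _ ?_]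
    · rw [pvInsert_front (fun p => p.2) (nm, 4) (F3 ++ F2 ++ F1 ++ F0) ?_]
      · simp [List.append_assoc]
      · intro y hy
        simp only [List.mem_append] at hy
        rcases hy with ((hy | hy) | hy) | hy
        · have := m3 y hy; simp only; omega
        · have := m2 y hy; simp only; omega
        · have := m1 y hy; simp only; omega
        · have := m0 y hy; simp only; omega
    · intro y hy
      have := m4 y hy; beta_reduce; omega

-- the stable reverse sort of score-bounded pairs is the concatenation of the score groups
theorem pvSorted_groups (ps : List (String × Int)) (h : ∀ p ∈ ps, 0 ≤ p.2 ∧ p.2 ≤ 4) :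
    PySem.List.sorted ps (fun x => x.2) true
      = (ps.filter (fun p => p.2 == 4)) ++ (ps.filter (fun p => p.2 == 3))
        ++ (ps.filter (fun p => p.2 == 2)) ++ (ps.filter (fun p => p.2 == 1))
        ++ (ps.filter (fun p => p.2 == 0)) := by
  rw [PySem.List.sorted_rev_eq_foldl_insertBy]
  induction ps using List.reverseRecOn with
  | nil => rfl
  | append_singleton ps x ih =>
      have hx := h x (by simp)
      have hps : ∀ p ∈ ps, 0 ≤ p.2 ∧ p.2 ≤ 4 := fun p hp => h p (by simp [hp])
      rw [List.foldl_append, List.foldl_cons, List.foldl_nil, ih hps]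
      simp only [List.filter_append]
      exact pvInsert_groups x _ _ _ _ _
        (fun y hy => by simpa using (List.mem_filter.mp hy).2)
        (fun y hy => by simpa using (List.mem_filter.mp hy).2)
        (fun y hy => by simpa using (List.mem_filter.mp hy).2)
        (fun y hy => by simpa using (List.mem_filter.mp hy).2)
        (fun y hy => by simpa using (List.mem_filter.mp hy).2) hx

-- B's guarded fold = the bucket fold over the filtered candidates
theorem pvFold_filter (rid rl : String) (ks : List String) (b : pvBuckets) :
    ks.foldl (pvBucketStep rid rl) b
      = (ks.filter (fun n => n != rid)).foldl
          (fun b name =>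
            let s := pvAltScore name rl
            if s == 4 then (b.1 ++ [name], b.2.1, b.2.2.1, b.2.2.2.1, b.2.2.2.2)
            else if s == 3 then (b.1, b.2.1 ++ [name], b.2.2.1, b.2.2.2.1, b.2.2.2.2)
            else if s == 2 then (b.1, b.2.1, b.2.2.1 ++ [name], b.2.2.2.1, b.2.2.2.2)
            else if s == 1 then (b.1, b.2.1, b.2.2.1, b.2.2.2.1 ++ [name], b.2.2.2.2)
            else (b.1, b.2.1, b.2.2.1, b.2.2.2.1, b.2.2.2.2 ++ [name])) b := by
  induction ks generalizing b with
  | nil => rfl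
  | cons k ks ih =>
      by_cases hk : k = rid
      · simp [pvBucketStep, hk, ih]
      · simp [pvBucketStep, hk, ih]

-- the bucket fold computes the five score filters
theorem pvFold_buckets (rl : String) (ns : List String) (b : pvBuckets) :
    ns.foldl
        (fun (b : pvBuckets) name =>
          let s := pvAltScore name rl
          if s == 4 then (b.1 ++ [name], b.2.1, b.2.2.1, b.2.2.2.1, b.2.2.2.2)
          else if s == 3 then (b.1, b.2.1 ++ [name], b.2.2.1, b.2.2.2.1, b.2.2.2.2)
          else if s == 2 then (b.1, b.2.1, b.2.2.1 ++ [name], b.2.2.2.1, b.2.2.2.2)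
          else if s == 1 then (b.1, b.2.1, b.2.2.1, b.2.2.2.1 ++ [name], b.2.2.2.2)
          else (b.1, b.2.1, b.2.2.1, b.2.2.2.1, b.2.2.2.2 ++ [name])) b
      = (b.1 ++ ns.filter (fun n => pvAltScore n rl == 4),
         b.2.1 ++ ns.filter (fun n => pvAltScore n rl == 3),
         b.2.2.1 ++ ns.filter (fun n => pvAltScore n rl == 2),
         b.2.2.2.1 ++ ns.filter (fun n => pvAltScore n rl == 1),
         b.2.2.2.2 ++ ns.filter (fun n => pvAltScore n rl == 0)) := by
  induction ns generalizing b with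
  | nil => simp
  | cons n ns ih =>
      simp only [List.foldl_cons, List.filter_cons]
      rw [ih]
      have hb := pvScore_bounds n rl
      by_cases h4 : pvAltScore n rl = 4
      · simp [h4, List.append_assoc]
      by_cases h3 : pvAltScore n rl = 3
      · simp [h3, List.append_assoc]
      by_cases h2 : pvAltScore n rl = 2
      · simp [h2, List.append_assoc]
      by_cases h1 : pvAltScore n rl = 1
      · simp [h1, List.append_assoc]
      · have h0 : pvAltScore n rl = 0 := by omega
        simp [h0, List.append_assoc]

-- A's score-appending loop is the map with B's score function
theorem pvA_scored (rl : String) (cs : List String) (acc : List (String × Int)) :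
    cs.foldl (fun acc candidate => acc ++ [(candidate, pvChainScore candidate rl)]) acc
      = acc ++ cs.map (fun c => (c, pvAltScore c rl)) := by
  induction cs generalizing acc with
  | nil => simp
  | cons c cs ih =>
      rw [List.foldl_cons, ih]
      simp [pvScore_eq]

-- projecting the names out of one score group
theorem pvMapFst_filter (rl : String) (s : Int) (cs : List String) :
    ((cs.map (fun c => (c, pvAltScore c rl))).filter (fun p => p.2 == s)).map (fun p => p.1)
      = cs.filter (fun n => pvAltScore n rl == s) := by
  induction cs with
  | nil => rfl
  | cons c cs ih =>
      simp only [List.map_cons, List.filter_cons]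
      by_cases h : pvAltScore c rl == s
      · simp only [h]; simp [ih]
      · simp only [h]; simp at h; simp [ih]

-- ===== VERDICT (by name: the statement is the Claim_ definition above) =====
theorem select_risk_assessors_py_spec : Claim_equal_select_risk_assessors_py := by
  intro rid rd la _
  unfold Spec_select_risk_assessors_py
  have hA : select_risk_assessors_py rid rd la
      = (PySem.List.sorted ((((PySem.Dict.ofList la).keys).filter (fun name => name != rid)).map
          (fun c => (c, pvAltScore c (PySem.Str.lower rd)))) (fun x => x.2) true).map (fun p => p.1) := by
    show (PySem.List.sorted ((((PySem.Dict.ofList la).keys).filter (fun name => name != rid)).foldl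
        (fun acc candidate => acc ++ [(candidate, pvChainScore candidate (PySem.Str.lower rd))]) [])
        (fun x => x.2) true).map (fun p => p.1) = _
    rw [pvA_scored, List.nil_append]
  have hB : select_risk_assessors_py_alt rid rd la
      = ((((PySem.Dict.ofList la).keys).filter (fun n => n != rid)).filter (fun n => pvAltScore n (PySem.Str.lower rd) == 4))
        ++ ((((PySem.Dict.ofList la).keys).filter (fun n => n != rid)).filter (fun n => pvAltScore n (PySem.Str.lower rd) == 3))
        ++ ((((PySem.Dict.ofList la).keys).filter (fun n => n != rid)).filter (fun n => pvAltScore n (PySem.Str.lower rd) == 2))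
        ++ ((((PySem.Dict.ofList la).keys).filter (fun n => n != rid)).filter (fun n => pvAltScore n (PySem.Str.lower rd) == 1))
        ++ ((((PySem.Dict.ofList la).keys).filter (fun n => n != rid)).filter (fun n => pvAltScore n (PySem.Str.lower rd) == 0)) := by
    show (let b := ((PySem.Dict.ofList la).keys).foldl (pvBucketStep rid (PySem.Str.lower rd)) ([], [], [], [], [])
          b.1 ++ b.2.1 ++ b.2.2.1 ++ b.2.2.2.1 ++ b.2.2.2.2) = _
    rw [pvFold_filter, pvFold_buckets]
    simp [List.append_assoc]
  rw [hA, hB]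
  rw [pvSorted_groups _ (by
    intro p hp
    simp only [List.mem_map] at hp
    obtain ⟨c, -, rfl⟩ := hp
    exact pvScore_bounds c _)]
  simp only [List.map_append, pvMapFst_filter]
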